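-- pv_equiv track=rewrite | github.com/rey-ezb/ezbtts | deployment/upload_coverage.py | pick_date_column
-- ===== SOURCE A (Python) =====
-- def normalize_column_name(value: str) -> str:
--     return " ".join("".join(ch.lower() if ch.isalnum() else " " for ch in str(value)).split())
--
-- def pick_date_column(columns: list[str], upload_type: str) -> str | None:
--     normalized = {column: normalize_column_name(column) for column in columns}
--     candidates: list[tuple[str, ...]]
--     if upload_type == "statements":
--         candidates = [
--             ("statement", "date"),
--             ("date",),
--         ]
--     else:
--         candidates = [
--             ("paid", "time"),
--             ("order", "date"),
--             ("paid", "date"),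
--             ("created", "time"),
--             ("created", "date"),
--         ]
--     for keywords in candidates:
--         for column, normalized_name in normalized.items():
--             if all(keyword in normalized_name for keyword in keywords):
--                 return column
--     return None
-- ===== SOURCE B (Python) =====
-- def normalize_column_name(value: str) -> str:
--     return " ".join("".join(ch.lower() if ch.isalnum() else " " for ch in str(value)).split())
--
-- def pick_date_column(columns, upload_type):
--     if upload_type == "statements":
--         candidates = [("statement", "date"), ("date",)]
--     else:
--         candidates = [
--             ("paid", "time"),
--             ("order", "date"),
--             ("paid", "date"),
--             ("created", "time"),
--             ("created", "date"),
--         ]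
--     best = None  # (rank, column) with the smallest rank; earliest column wins ties
--     for column in columns:
--         name = normalize_column_name(column)
--         rank = next(
--             (r for r, keywords in enumerate(candidates)
--              if all(keyword in name for keyword in keywords)),
--             None,
--         )
--         if rank is not None and (best is None or rank < best[0]):
--             best = (rank, column)
--     return best[1] if best is not None else None
-- ===== Notes on version B (the rewrite author's own statement) =====
-- stated objective: alternative
-- what changed: Replaces A's candidate-outer early-return scan over a normalized dict with a single pass over the columns that scores each column by the index of the first candidate keyword set it satisfies and keeps the column with the strictly smallest rank (earliest column wins ties).
import Mathlib
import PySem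

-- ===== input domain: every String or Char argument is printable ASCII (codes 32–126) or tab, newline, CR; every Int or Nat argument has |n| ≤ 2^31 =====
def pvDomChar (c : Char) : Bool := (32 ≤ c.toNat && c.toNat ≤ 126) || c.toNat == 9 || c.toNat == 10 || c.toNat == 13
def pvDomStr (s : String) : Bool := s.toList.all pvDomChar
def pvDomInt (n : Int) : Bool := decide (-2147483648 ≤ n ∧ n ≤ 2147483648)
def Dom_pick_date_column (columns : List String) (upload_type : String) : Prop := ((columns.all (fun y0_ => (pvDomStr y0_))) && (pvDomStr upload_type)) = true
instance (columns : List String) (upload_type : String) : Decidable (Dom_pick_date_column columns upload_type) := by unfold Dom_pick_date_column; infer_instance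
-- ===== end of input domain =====

-- B replaces A's candidate-outer early-return scan over a normalized dict by a single pass over
-- the columns that scores each column by the index of the first matching candidate keyword set
-- and keeps the column with the strictly smallest rank (alternative decomposition, same cost).

-- ===== PORT A =====
-- shared module helper normalize_column_name (identical in both sources)
def normalize_column_name (value : String) : String :=
  PySem.Str.join " " (PySem.Str.split₀
    (String.ofList (value.toList.map (fun ch => if PySem.Chars.isalnum ch then PySem.Chars.lowerChar ch else ' '))))

-- A's outer loop over candidates with inner early-return scan over the dict items
def pickA_loop (cands : List (List String)) (items : List (String × String)) : Option String :=
  match cands with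
  | [] => none
  | kws :: rest =>
    match items.find? (fun p => kws.all (fun k => PySem.Str.isIn k p.2)) with
    | some p => some p.1
    | none => pickA_loop rest items

def pick_date_column (columns : List String) (upload_type : String) : Option String :=
  let normalized : PySem.Dict String String :=
    columns.foldl (fun d c => d.insert c (normalize_column_name c)) PySem.Dict.empty
  let candidates : List (List String) :=
    if upload_type == "statements" then
      [["statement", "date"], ["date"]]
    else
      [["paid", "time"], ["order", "date"], ["paid", "date"], ["created", "time"], ["created", "date"]]
  pickA_loop candidates normalized.items

-- ===== PORT B =====
-- rank of a normalized name = index of the first candidate keyword set it fully contains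
def pickB_rank (cands : List (List String)) (name : String) : Option Nat :=
  cands.findIdx? (fun kws => kws.all (fun k => PySem.Str.isIn k name))

-- one step of B's single pass: keep the (rank, column) with strictly smaller rank
def pickB_step (cands : List (List String)) (best : Option (Nat × String)) (col : String) :
    Option (Nat × String) :=
  match pickB_rank cands (normalize_column_name col) with
  | none => best
  | some r =>
    match best with
    | none => some (r, col)
    | some (r0, _) => if r < r0 then some (r, col) else best

def pick_date_column_alt (columns : List String) (upload_type : String) : Option String :=
  let candidates : List (List String) :=
    if upload_type == "statements" then
      [["statement", "date"], ["date"]]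
    else
      [["paid", "time"], ["order", "date"], ["paid", "date"], ["created", "time"], ["created", "date"]]
  (columns.foldl (pickB_step candidates) none).map (·.2)

-- ===== PRECONDITION & SPEC =====
def Spec_pick_date_column (columns : List String) (upload_type : String) (out : Option String) : Prop := out = pick_date_column_alt columns upload_type
instance (columns : List String) (upload_type : String) (out : Option String) : Decidable (Spec_pick_date_column columns upload_type out) := by unfold Spec_pick_date_column; infer_instance

-- ===== CLAIM (what is proved, stated in full; the proofs are below) =====
def Claim_equal_pick_date_column : Prop := ∀ (columns : List String) (upload_type : String), Dom_pick_date_column columns upload_type → Spec_pick_date_column columns upload_type (pick_date_column columns upload_type)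

-- ===== LEMMAS AND PROOFS =====

-- the (column, normalized name) pair of a column
def pvPair (c : String) : String × String := (c, normalize_column_name c)

-- specification of B's pass, as structural recursion over the pair list (earlier pair wins ties)
def pvBest (cands : List (List String)) : List (String × String) → Option (Nat × String)
  | [] => none
  | p :: rest =>
    match pickB_rank cands p.2, pvBest cands rest with
    | none, b => b
    | some r, none => some (r, p.1)
    | some r, some (r', c') => if r ≤ r' then some (r, p.1) else some (r', c')

-- combining an accumulator with the best of the remaining list (accumulator wins ties)
def pvComb (acc b : Option (Nat × String)) : Option (Nat × String) :=
  match acc, b with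
  | acc, none => acc
  | none, b => b
  | some (r0, c0), some (r, c) => if r < r0 then some (r, c) else some (r0, c0)

theorem pickB_rank_cons (kws : List String) (cs : List (List String)) (name : String) :
    pickB_rank (kws :: cs) name =
      if kws.all (fun k => PySem.Str.isIn k name) then some 0
      else (pickB_rank cs name).map (· + 1) := by
  simp [pickB_rank, List.findIdx?_cons]

-- B's fold equals pvComb of the accumulator with pvBest
theorem pvFold_eq_comb (cands : List (List String)) (pairs : List (String × String)) :
    ∀ acc, pairs.foldl
        (fun b p => match pickB_rank cands p.2 with
          | none => b
          | some r => match b with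
            | none => some (r, p.1)
            | some (r0, _) => if r < r0 then some (r, p.1) else b) acc
      = pvComb acc (pvBest cands pairs) := by
  induction pairs with
  | nil => intro acc; cases acc <;> simp [pvComb, pvBest]
  | cons p rest ih =>
    intro acc
    simp only [List.foldl_cons, ih]
    rcases hr : pickB_rank cands p.2 with _ | r <;>
      rcases hb : pvBest cands rest with _ | ⟨r', c'⟩ <;>
      rcases acc with _ | ⟨r0, c0⟩ <;>
      simp [pvBest, pvComb, hr, hb] <;>
      (try split_ifs) <;> (try simp) <;> (try split_ifs) <;> first | rfl | omega

theorem pvBest_nil_cands (pairs : List (String × String)) : pvBest [] pairs = none := by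
  induction pairs with
  | nil => rfl
  | cons p rest ih => simp [pvBest, pickB_rank, ih]

theorem pvBest_cons_of_find_some (kws : List String) (cs : List (List String))
    (pairs : List (String × String)) (q : String × String)
    (h : pairs.find? (fun p => kws.all (fun k => PySem.Str.isIn k p.2)) = some q) :
    pvBest (kws :: cs) pairs = some (0, q.1) := by
  induction pairs with
  | nil => simp at h
  | cons p rest ih =>
    rw [List.find?_cons] at h
    split at h
    · rename_i hm
      cases h
      simp only [pvBest, pickB_rank_cons, hm, if_true]
      rcases pvBest (kws :: cs) rest with _ | ⟨r', c'⟩ <;> simp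
    · rename_i hm
      have hb := ih h
      have hm' : kws.all (fun k => PySem.Str.isIn k p.2) = false := by simpa using hm
      simp only [pvBest, pickB_rank_cons, hm', Bool.false_eq_true, if_false, hb]
      rcases hr : pickB_rank cs p.2 with _ | r <;> simp

theorem pvBest_cons_of_find_none (kws : List String) (cs : List (List String))
    (pairs : List (String × String))
    (h : pairs.find? (fun p => kws.all (fun k => PySem.Str.isIn k p.2)) = none) :
    pvBest (kws :: cs) pairs = (pvBest cs pairs).map (fun rc => (rc.1 + 1, rc.2)) := by
  induction pairs with
  | nil => simp [pvBest]
  | cons p rest ih =>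
    rw [List.find?_cons] at h
    split at h
    · simp at h
    · rename_i hm
      have hb := ih h
      have hm' : kws.all (fun k => PySem.Str.isIn k p.2) = false := by
        simpa using hm
      simp only [pvBest, pickB_rank_cons, hm', Bool.false_eq_true, if_false, hb]
      rcases hr : pickB_rank cs p.2 with _ | r <;>
        rcases hc : pvBest cs rest with _ | ⟨r', c'⟩ <;>
        simp <;> try (split_ifs <;> first | rfl | omega)

-- A's scan equals the projection of pvBest
theorem pickA_eq_best (cands : List (List String)) (pairs : List (String × String)) :
    pickA_loop cands pairs = (pvBest cands pairs).map (·.2) := by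
  induction cands with
  | nil => simp [pickA_loop, pvBest_nil_cands]
  | cons kws cs ih =>
    rcases hf : pairs.find? (fun p => kws.all (fun k => PySem.Str.isIn k p.2)) with _ | q
    · rw [show pickA_loop (kws :: cs) pairs = pickA_loop cs pairs from by
        simp only [pickA_loop, hf]]
      rw [pvBest_cons_of_find_none kws cs pairs hf, ih]
      rcases pvBest cs pairs with _ | ⟨r, c⟩ <;> simp
    · rw [show pickA_loop (kws :: cs) pairs = some q.1 from by
        simp only [pickA_loop, hf]]
      rw [pvBest_cons_of_find_some kws cs pairs q hf]
      simp

-- the dict built by A answers find? exactly like the full pair list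
theorem pvDict_find (cols : List String) :
    ∀ (d : PySem.Dict String String), (∀ p ∈ d.items, p.2 = normalize_column_name p.1) →
    ∀ (q : String × String → Bool),
    List.find? q ((cols.foldl (fun d c => d.insert c (normalize_column_name c)) d).items)
      = List.find? q (d.items ++ cols.map pvPair) := by
  induction cols with
  | nil => intro d _ q; simp
  | cons c rest ih =>
    intro d hinv q
    simp only [List.foldl_cons, List.map_cons]
    by_cases hc : d.contains c = true
    · have hmem : (c, normalize_column_name c) ∈ d.items := by
        rw [PySem.Dict.contains_eq_decide_mem_keys] at hc
        have : c ∈ d.keys := by simpa using hc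
        simp only [PySem.Dict.keys, List.mem_map] at this
        obtain ⟨p, hp, hpc⟩ := this
        have := hinv p hp
        have : p = (c, normalize_column_name c) := by
          cases p; simp_all
        rwa [this] at hp
      have hins : d.insert c (normalize_column_name c) = d := by
        apply PySem.Dict.ext
        rw [PySem.Dict.items_insert_of_contains d _ hc]
        have : ∀ p ∈ d.items,
            (fun p => if (p.1 == c) = true then (c, normalize_column_name c) else p) p = id p := by
          intro p hp
          by_cases h : p.1 = c
          · have := hinv p hp
            simp [h]; cases p; simp_all
          · simp [h]
        rw [List.map_congr_left this, List.map_id]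
      rw [hins, ih d hinv q]
      rw [List.find?_append, List.find?_append]
      rcases hfd : List.find? q d.items with _ | w
      · have hq : q (c, normalize_column_name c) = false := by
          have := List.find?_eq_none.mp hfd
          simpa using this _ hmem
        simp [hq, pvPair]
      · simp
    · have hc' : d.contains c = false := by simpa using hc
      have hitems := PySem.Dict.items_insert_of_not_contains d (normalize_column_name c) hc'
      have hinv' : ∀ p ∈ (d.insert c (normalize_column_name c)).items,
          p.2 = normalize_column_name p.1 := by
        intro p hp
        rw [hitems] at hp
        rcases List.mem_append.mp hp with h | h
        · exact hinv p h
        · simp at h; subst h; rfl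
      rw [ih _ hinv' q, hitems]
      simp [pvPair, List.append_assoc]

-- ===== VERDICT (by name: the statement is the Claim_ definition above) =====
theorem pick_date_column_spec : Claim_equal_pick_date_column := by
  intro columns upload_type _
  unfold Spec_pick_date_column pick_date_column pick_date_column_alt
  set cands : List (List String) :=
    if upload_type == "statements" then
      [["statement", "date"], ["date"]]
    else
      [["paid", "time"], ["order", "date"], ["paid", "date"], ["created", "time"], ["created", "date"]]
    with hcands
  have hdict := pvDict_find columns PySem.Dict.empty (by intro p hp; simp [PySem.Dict.empty] at hp)
  have hA : pickA_loop cands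
      ((columns.foldl (fun d c => d.insert c (normalize_column_name c)) PySem.Dict.empty).items)
      = pickA_loop cands (columns.map pvPair) := by
    induction cands with
    | nil => simp [pickA_loop]
    | cons kws cs ihc =>
      simp only [pickA_loop]
      rw [hdict _]
      have : List.find? (fun p => kws.all (fun k => PySem.Str.isIn k p.2))
          ((PySem.Dict.empty : PySem.Dict String String).items ++ columns.map pvPair)
          = List.find? (fun p => kws.all (fun k => PySem.Str.isIn k p.2)) (columns.map pvPair) := by
        simp [PySem.Dict.empty]
      rw [this, ihc]
  rw [hA, pickA_eq_best]
  have hfold : columns.foldl (pickB_step cands) none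
      = (columns.map pvPair).foldl
          (fun b p => match pickB_rank cands p.2 with
            | none => b
            | some r => match b with
              | none => some (r, p.1)
              | some (r0, _) => if r < r0 then some (r, p.1) else b) none := by
    rw [List.foldl_map]
    rfl
  show Option.map (fun x => x.2) (pvBest cands (columns.map pvPair))
      = Option.map (fun x => x.2) (columns.foldl (pickB_step cands) none)
  rw [hfold, pvFold_eq_comb]
  rcases pvBest cands (columns.map pvPair) with _ | ⟨r, c⟩ <;> simp [pvComb]
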